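-- pv_equiv track=rewrite | github.com/yoonho0922/Algorithm | python/daliy-solve/2024-08/week05/이차원배열과연산.py | sort_row
-- ===== SOURCE A (Python) =====
-- def sort_row(n, m, G):
--     # 1. 행에 대해서 정렬을 수행한다
--     # 2. 늘어난 m을 반환한다
--     max_m = m
--
--     for r in range(n):
--         number_cnt = {}
--         for c in range(m):
--             if G[r][c]:
--                 number = G[r][c]
--                 if number_cnt.get(number):
--                     number_cnt[number] += 1
--                 else:
--                     number_cnt[number] = 1
--
--         col = 0
--         sorted_number_cnt = sorted(number_cnt.items(), key= lambda x:[x[1],x[0]])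
--         for number, cnt in sorted_number_cnt:
--             G[r][col] = number
--             G[r][col+1] = cnt
--             col += 2
--         for c in range(col, m):
--             G[r][c] = 0
--         max_m = max(max_m, col)
--
--     return max_m
-- ===== SOURCE B (Python) =====
-- def sort_row(n, m, G):
--     # Sort-and-group re-implementation: run-length-encode each sorted row
--     # instead of a dict frequency table. Rows are rebuilt as fresh lists.
--     max_m = m
--     for r in range(n):
--         ys = sorted(v for v in G[r][:m] if v)
--         pairs = []
--         i = 0
--         while i < len(ys):
--             j = i
--             while j < len(ys) and ys[j] == ys[i]:
--                 j += 1
--             pairs.append((ys[i], j - i))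
--             i = j
--         pairs.sort(key=lambda p: (p[1], p[0]))
--         flat = [x for p in pairs for x in p]
--         G[r] = flat + [0] * (m - len(flat))
--         max_m = max(max_m, len(flat))
--     return max_m
-- ===== Notes on version B (the rewrite author's own statement) =====
-- stated objective: alternative
-- what changed: Replaces the per-row dict frequency table with sort-then-group run-length encoding: the nonzero prefix entries of each row are sorted, runs of equal values are counted in one linear pass, and the (value,count) pairs are sorted and written back; Pre_ restricts to the natural domain (grid width m >= 0, n rows present when rows are accessed) and to rows long enough for A's in-place reads/writes, since outside it A raises or its value rests on reading nothing for a negative width.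
-- outside the precondition, e.g. on sort_row(2, 0, []): A returns 0, B raises IndexError; on sort_row(1, -1, [[1, 2]]): A returns 0, B returns 2
import Mathlib
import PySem

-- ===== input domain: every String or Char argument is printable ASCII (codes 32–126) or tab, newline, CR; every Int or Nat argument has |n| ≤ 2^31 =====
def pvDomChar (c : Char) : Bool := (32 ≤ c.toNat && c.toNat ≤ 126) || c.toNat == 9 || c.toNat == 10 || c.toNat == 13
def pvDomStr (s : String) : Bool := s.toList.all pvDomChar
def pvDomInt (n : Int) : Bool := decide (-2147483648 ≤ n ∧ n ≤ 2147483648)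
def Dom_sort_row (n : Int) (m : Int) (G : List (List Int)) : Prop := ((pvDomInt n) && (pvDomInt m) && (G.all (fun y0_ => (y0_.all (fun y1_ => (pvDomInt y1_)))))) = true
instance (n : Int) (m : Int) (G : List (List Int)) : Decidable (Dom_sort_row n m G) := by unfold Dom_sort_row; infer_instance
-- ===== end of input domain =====

-- B replaces A's dict frequency table by sort-then-group run-length encoding (objective: alternative).
-- A mutates the rows of G in place; the equivalence proved here is about the RETURN value
-- (B rebinds G[r] to a fresh list with the same sorted pairs).

-- ===== PORT A =====
-- inner counting loop: for c in range(m): if G[r][c]: … dict get/insert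
def aCount (m : Int) (row : List Int) : PySem.Dict Int Int :=
  (PySem.List.pyRange 0 m 1).foldl (fun d c =>
    if PySem.List.pyGetD row c 0 ≠ 0 then
      let number := PySem.List.pyGetD row c 0
      match d.get? number with
      | some cv => if cv ≠ 0 then d.insert number (cv + 1) else d.insert number 1
      | none => d.insert number 1
    else d) PySem.Dict.empty

-- write loop: for number, cnt in sorted_number_cnt: G[r][col]=number; G[r][col+1]=cnt; col += 2
def aWrite (ps : List (Int × Int)) (row : List Int) : List Int × Int :=
  ps.foldl (fun (rc : List Int × Int) p =>
    (PySem.List.pySetD (PySem.List.pySetD rc.1 rc.2 p.1) (rc.2 + 1) p.2, rc.2 + 2)) (row, 0)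

-- one iteration of 'for r in range(n)' (in-place cell writes modeled by rebuilding the row)
def aRowStep (m : Int) (st : List (List Int) × Int) (r : Int) : List (List Int) × Int :=
  let row := PySem.List.pyGetD st.1 r []
  let sorted_number_cnt := PySem.List.sorted2 (aCount m row).items (fun x => x.2) (fun x => x.1)
  let wc := aWrite sorted_number_cnt row
  let row2 := (PySem.List.pyRange wc.2 m 1).foldl (fun rw c => PySem.List.pySetD rw c 0) wc.1
  (PySem.List.pySetD st.1 r row2, max st.2 wc.2)

def sort_row (n : Int) (m : Int) (G : List (List Int)) : Int :=
  ((PySem.List.pyRange 0 n 1).foldl (aRowStep m) (G, m)).2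

-- ===== PORT B =====
-- the nested while loops: extract each run of equal values from the sorted list
def groupRuns : List Int → List (Int × Int)
  | [] => []
  | v :: rest =>
      (v, ((rest.takeWhile (· == v)).length : Int) + 1) ::
        groupRuns (rest.dropWhile (· == v))
  termination_by ys => ys.length
  decreasing_by
    have := List.length_dropWhile_le (p := (· == v)) (l := rest)
    simp only [List.length_cons]
    omega

-- one iteration of B's 'for r in range(n)': sort, group, re-sort pairs, rebuild the row
def bRow (m : Int) (row : List Int) : List Int × Int :=
  let ys := PySem.List.sorted ((PySem.List.slice row none (some m)).filter (fun v => !(v == 0))) (fun x => x) false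
  let pairs := PySem.List.sorted2 (groupRuns ys) (fun p => p.2) (fun p => p.1)
  let flat := pairs.flatMap (fun p => [p.1, p.2])
  let L : Int := flat.length
  (flat ++ List.replicate (m - L).toNat 0, L)

def bRowStep (m : Int) (st : List (List Int) × Int) (r : Int) : List (List Int) × Int :=
  let p := bRow m (PySem.List.pyGetD st.1 r [])
  (PySem.List.pySetD st.1 r p.1, max st.2 p.2)

def sort_row_alt (n : Int) (m : Int) (G : List (List Int)) : Int :=
  ((PySem.List.pyRange 0 n 1).foldl (bRowStep m) (G, m)).2

-- ===== PRECONDITION & SPEC =====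
-- Pre_ restricts to the task's natural domain and to where A returns normally: grid width
-- m ≥ 0 whenever rows are processed (for negative m A's range(m) reads nothing while B's slice reads from the end, see
-- cites), every accessed row present (for m = 0 and n > len(G), A returns without touching G
-- while B's G[r] raises, see cites), each row at least m long (else A's read G[r][c] raises
-- IndexError) and long enough to hold its 2·k written (value,count) cells (else A's write raises).
def Pre_sort_row (n : Int) (m : Int) (G : List (List Int)) : Prop :=
  (0 < n → 0 ≤ m) ∧
  (0 < n → n ≤ (G.length : Int)) ∧
  ∀ r : Nat, r < n.toNat →
    m ≤ (((G.getD r []) : List Int).length : Int) ∧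
    2 * ((PySem.Set.ofList (((G.getD r []).take m.toNat).filter (fun v => !(v == 0)))).length : Int)
      ≤ ((G.getD r []).length : Int)

instance (n : Int) (m : Int) (G : List (List Int)) : Decidable (Pre_sort_row n m G) := by
  unfold Pre_sort_row; infer_instance

def pvWitness_sort_row : Int × Int × List (List Int) := (2, 2, [[1, 1], [0, 2]])

def Spec_sort_row (n : Int) (m : Int) (G : List (List Int)) (out : Int) : Prop := out = sort_row_alt n m G
instance (n : Int) (m : Int) (G : List (List Int)) (out : Int) : Decidable (Spec_sort_row n m G out) := by unfold Spec_sort_row; infer_instance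

-- ===== CLAIM (what is proved, stated in full; the proofs are below) =====
def Claim_equal_sort_row : Prop := ∀ (n : Int) (m : Int) (G : List (List Int)), Dom_sort_row n m G → Pre_sort_row n m G → Spec_sort_row n m G (sort_row n m G)

-- ===== LEMMAS AND PROOFS =====

-- the per-row part of Pre_: row long enough for the reads and the 2·k writes
def rowOK (m : Int) (row : List Int) : Prop :=
  m ≤ (row.length : Int) ∧
  2 * ((PySem.Set.ofList ((row.take m.toNat).filter (fun v => !(v == 0)))).length : Int) ≤ (row.length : Int)

-- A's dict-update branch is always 'insert v (getD v 0 + 1)'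
theorem aStep_eq (d : PySem.Dict Int Int) (v : Int) :
    (match d.get? v with
     | some cv => if cv ≠ 0 then d.insert v (cv + 1) else d.insert v 1
     | none => d.insert v 1) = d.insert v (d.getD v 0 + 1) := by
  cases h : d.get? v with
  | none => simp [PySem.Dict.getD_eq_get?_getD, h]
  | some cv =>
      by_cases hc : cv = 0 <;>
        simp [PySem.Dict.getD_eq_get?_getD, h, hc]

-- writing a cell never changes a later cell
theorem pyGetD_pySetD_gt {α : Type} (xs : List α) (i j : Int) (v d : α)
    (hi : 0 ≤ i) (hij : i < j) :
    PySem.List.pyGetD (PySem.List.pySetD xs i v) j d = PySem.List.pyGetD xs j d := by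
  by_cases h : i.toNat < xs.length
  · have hi' : i = (i.toNat : Int) := by omega
    have hj' : j = (j.toNat : Int) := by omega
    rw [hi', hj']
    unfold PySem.List.pySetD
    rw [PySem.List.pySet?_natCast (h := h)]
    simp only [Option.getD_some]
    rw [PySem.List.pyGetD_natCast, PySem.List.pyGetD_natCast]
    rw [List.getD_eq_getElem?_getD, List.getD_eq_getElem?_getD]
    rw [List.getElem?_set_ne (by omega)]
  · have : PySem.List.pySet? xs i v = none := by
      rw [PySem.List.pySet?_eq_none_iff]
      simp [PySem.Raise.InRange]
      omega
    unfold PySem.List.pySetD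
    rw [this]
    rfl

-- A's counting loop is Counter over the nonzero prefix
theorem aCount_eq_counter (m : Int) (row : List Int) (h0 : 0 ≤ m) (hm : m ≤ (row.length : Int)) :
    aCount m row = PySem.Dict.counter ((row.take m.toNat).filter (fun v => !(v == 0))) := by
  unfold aCount
  have hbody : (fun (d : PySem.Dict Int Int) (c : Int) =>
      if PySem.List.pyGetD row c 0 ≠ 0 then
        let number := PySem.List.pyGetD row c 0
        match d.get? number with
        | some cv => if cv ≠ 0 then d.insert number (cv + 1) else d.insert number 1
        | none => d.insert number 1
      else d)
      = (fun (d : PySem.Dict Int Int) (c : Int) =>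
        if PySem.List.pyGetD row c 0 ≠ 0 then
          d.insert (PySem.List.pyGetD row c 0) (d.getD (PySem.List.pyGetD row c 0) 0 + 1)
        else d) := by
    funext d c
    split_ifs with h
    · exact aStep_eq d (PySem.List.pyGetD row c 0)
    · rfl
  rw [hbody]
  have hlen : ((row.take m.toNat).length : Int) = m := by
    simp [List.length_take]
    omega
  have hrange : PySem.List.pyRange 0 m 1 = PySem.List.pyRange 0 (((row.take m.toNat).length : Int)) 1 := by
    rw [hlen]
  rw [hrange]
  rw [PySem.List.foldl_congr_mem (PySem.List.pyRange 0 (((row.take m.toNat).length : Int)) 1)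
    (fun (d : PySem.Dict Int Int) (c : Int) =>
      if PySem.List.pyGetD row c 0 ≠ 0 then
        d.insert (PySem.List.pyGetD row c 0) (d.getD (PySem.List.pyGetD row c 0) 0 + 1)
      else d)
    (fun (d : PySem.Dict Int Int) (c : Int) =>
      if PySem.List.pyGetD (row.take m.toNat) c 0 ≠ 0 then
        d.insert (PySem.List.pyGetD (row.take m.toNat) c 0)
          (d.getD (PySem.List.pyGetD (row.take m.toNat) c 0) 0 + 1)
      else d)
    PySem.Dict.empty
    (by
      intro acc c hc
      have hc' := (PySem.List.mem_pyRange_one).mp hc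
      have hget : PySem.List.pyGetD row c 0 = PySem.List.pyGetD (row.take m.toNat) c 0 := by
        rw [PySem.List.pyGetD_eq_getElem row 0 (by omega) (by omega),
            PySem.List.pyGetD_eq_getElem (row.take m.toNat) 0 (by omega) (by omega)]
        rw [List.getElem_take]
      simp only [hget])]
  rw [PySem.List.foldl_pyRange_zero_pyGetD' (row.take m.toNat) 0
      (fun (d' : PySem.Dict Int Int) (v : Int) => if v ≠ 0 then d'.insert v (d'.getD v 0 + 1) else d')
      PySem.Dict.empty]
  rw [PySem.List.foldl_ite_eq_foldl_filter (fun v => v ≠ 0)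
      (fun (d' : PySem.Dict Int Int) (v : Int) => d'.insert v (d'.getD v 0 + 1))
      (row.take m.toNat) PySem.Dict.empty]
  have hfe : ((row.take m.toNat).filter (fun v => decide (v ≠ 0)))
      = ((row.take m.toNat).filter (fun v => !(v == 0))) := by
    apply List.filter_congr
    intro v _
    simp only [decide_not]
    cases h : v == 0 <;> simp_all
  rw [hfe]
  exact PySem.Dict.foldl_insert_getD_add_one_eq_counter ((row.take m.toNat).filter (fun v => !(v == 0)))

theorem aWrite_snd_aux (ps : List (Int × Int)) : ∀ (row0 : List Int) (c0 : Int),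
    (ps.foldl (fun (rc : List Int × Int) p =>
      (PySem.List.pySetD (PySem.List.pySetD rc.1 rc.2 p.1) (rc.2 + 1) p.2, rc.2 + 2)) (row0, c0)).2
      = c0 + 2 * (ps.length : Int) := by
  induction ps with
  | nil => intro row0 c0; simp
  | cons p t ih =>
      intro row0 c0
      simp only [List.foldl_cons, ih, List.length_cons]
      push_cast
      ring

theorem aWrite_snd (ps : List (Int × Int)) (row0 : List Int) :
    (aWrite ps row0).2 = 2 * (ps.length : Int) := by
  have := aWrite_snd_aux ps row0 0
  unfold aWrite
  omega

theorem flat_len (ps : List (Int × Int)) :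
    ((ps.flatMap (fun p => [p.1, p.2])).length : Int) = 2 * (ps.length : Int) := by
  induction ps with
  | nil => simp
  | cons p t ih => simp_all; omega

theorem setLen_perm (xs ys : List Int) (h : xs.Perm ys) :
    (PySem.Set.ofList xs).length = (PySem.Set.ofList ys).length := by
  have hp : (PySem.Set.ofList xs).Perm (PySem.Set.ofList ys) := by
    rw [List.perm_ext_iff_of_nodup (PySem.Set.nodup_ofList xs) (PySem.Set.nodup_ofList ys)]
    intro a
    simp only [PySem.Set.mem_ofList]
    exact h.mem_iff
  exact hp.length_eq

-- run count of a sorted list = number of distinct elements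
theorem groupRuns_length (ys : List Int) (h : ys.Pairwise (· ≤ ·)) :
    (groupRuns ys).length = (PySem.Set.ofList ys).length := by
  induction ys using groupRuns.induct with
  | case1 => simp [groupRuns]
  | case2 v rest ih =>
      have hrest : rest.Pairwise (· ≤ ·) := (List.pairwise_cons.mp h).2
      have hle : ∀ x ∈ rest, v ≤ x := (List.pairwise_cons.mp h).1
      have hsub : (rest.dropWhile (· == v)).Sublist rest := List.dropWhile_sublist _
      have ht : (rest.dropWhile (· == v)).Pairwise (· ≤ ·) := hrest.sublist hsub
      have hvnot : v ∉ rest.dropWhile (· == v) := by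
        intro hv
        cases hteq : rest.dropWhile (· == v) with
        | nil => rw [hteq] at hv; exact absurd hv (List.not_mem_nil)
        | cons h0 t' =>
            have hne : (h0 == v) = false := by
              have h1 := List.head?_dropWhile_not (· == v) rest
              rw [hteq] at h1
              simpa using h1
            have hh0 : h0 ≠ v := by simpa using hne
            have hh0mem : h0 ∈ rest := hsub.mem (by rw [hteq]; exact List.mem_cons_self)
            have hvle : v ≤ h0 := hle h0 hh0mem
            have hlt : v < h0 := lt_of_le_of_ne hvle (Ne.symm hh0)
            rw [hteq] at hv
            rcases List.mem_cons.mp hv with h1 | h1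
            · exact hh0 h1.symm
            · have := (List.pairwise_cons.mp (hteq ▸ ht)).1 v h1
              omega
      have hmem : ∀ x : Int, x ∈ rest.dropWhile (· == v) ↔ (x ∈ rest ∧ x ≠ v) := by
        intro x
        constructor
        · intro hx
          refine ⟨hsub.mem hx, ?_⟩
          intro hxv
          exact hvnot (hxv ▸ hx)
        · rintro ⟨hx, hxv⟩
          rw [← List.takeWhile_append_dropWhile (p := (· == v)) (l := rest)] at hx
          rcases List.mem_append.mp hx with h1 | h1
          · have := List.mem_takeWhile_imp h1
            simp at this
            exact absurd this hxv
          · exact h1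
      have hperm : ((PySem.Set.ofList rest).discard v).Perm (PySem.Set.ofList (rest.dropWhile (· == v))) := by
        rw [List.perm_ext_iff_of_nodup
          (PySem.Set.nodup_discard _ v (PySem.Set.nodup_ofList rest))
          (PySem.Set.nodup_ofList _)]
        intro a
        rw [PySem.Set.mem_discard, PySem.Set.mem_ofList, PySem.Set.mem_ofList, hmem a]
      rw [groupRuns, PySem.Set.ofList_cons]
      simp only [List.length_cons]
      rw [ih ht, hperm.length_eq]

-- per-row: A's final col = B's flat length
theorem col_eq (m : Int) (row : List Int) (hm : 0 ≤ m) (hok : rowOK m row) :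
    (aWrite (PySem.List.sorted2 (aCount m row).items (fun x => x.2) (fun x => x.1)) row).2
      = (bRow m row).2 := by
  rw [aWrite_snd]
  have hwtake : PySem.List.slice row none (some m) = row.take m.toNat :=
    PySem.List.slice_to row hm
  have hysxs : (PySem.List.sorted ((PySem.List.slice row none (some m)).filter
      (fun v => !(v == 0))) (fun x => x) false).Perm
      ((row.take m.toNat).filter (fun v => !(v == 0))) := by
    rw [hwtake]
    exact PySem.List.sorted_perm _ _ _
  have hsorted : (PySem.List.sorted ((PySem.List.slice row none (some m)).filter
      (fun v => !(v == 0))) (fun x => x) false).Pairwise (· ≤ ·) := by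
    have := PySem.List.sorted_pairwise ((PySem.List.slice row none (some m)).filter
      (fun v => !(v == 0))) (fun x => x)
    simpa using this
  have hA : (aCount m row).items.length
      = (PySem.Set.ofList ((row.take m.toNat).filter (fun v => !(v == 0)))).length := by
    rw [aCount_eq_counter m row hm hok.1]
    rw [PySem.Dict.items_counter]
    rw [List.length_map]
  have hB : (bRow m row).2
      = 2 * ((PySem.Set.ofList ((row.take m.toNat).filter (fun v => !(v == 0)))).length : Int) := by
    unfold bRow
    simp only [flat_len]
    rw [(PySem.List.sorted2_perm _ _ _ _).length_eq]
    rw [groupRuns_length _ hsorted]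
    rw [setLen_perm _ _ hysxs]
  rw [hB, (PySem.List.sorted2_perm _ _ _ _).length_eq, hA]

theorem loop_eq (m n : Int) (G : List (List Int)) (hm : 0 ≤ m)
    (hrow : ∀ r : Nat, (r : Int) < n → rowOK m (G.getD r [])) :
    ∀ (k : Nat) (a : Int) (GA GB : List (List Int)) (mm : Int), 0 ≤ a → (n - a).toNat = k →
    (∀ j : Int, a ≤ j → PySem.List.pyGetD GA j [] = PySem.List.pyGetD G j []) →
    (∀ j : Int, a ≤ j → PySem.List.pyGetD GB j [] = PySem.List.pyGetD G j []) →
    ((PySem.List.pyRange a n 1).foldl (aRowStep m) (GA, mm)).2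
      = ((PySem.List.pyRange a n 1).foldl (bRowStep m) (GB, mm)).2 := by
  intro k
  induction k with
  | zero =>
      intro a GA GB mm ha hk hA hB
      rw [PySem.List.pyRange_one_eq_nil (by omega)]
      rfl
  | succ k ih =>
      intro a GA GB mm ha hk hA hB
      have han : a < n := by omega
      rw [PySem.List.pyRange_one_cons han]
      simp only [List.foldl_cons]
      have hrowA : PySem.List.pyGetD GA a [] = PySem.List.pyGetD G a [] := hA a le_rfl
      have hrowB : PySem.List.pyGetD GB a [] = PySem.List.pyGetD G a [] := hB a le_rfl
      have hokr : rowOK m (PySem.List.pyGetD G a []) := by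
        have h1 : PySem.List.pyGetD G a [] = G.getD a.toNat [] := by
          have h2 : a = ((a.toNat : Nat) : Int) := by omega
          rw [h2, PySem.List.pyGetD_natCast]
          simp only [Int.toNat_natCast]
        rw [h1]
        exact hrow a.toNat (by omega)
      simp only [aRowStep, bRowStep, hrowA, hrowB]
      rw [col_eq m (PySem.List.pyGetD G a []) hm hokr]
      apply ih (a + 1) _ _ _ (by omega) (by omega)
      · intro j hj
        rw [pyGetD_pySetD_gt GA a j _ _ ha (by omega)]
        exact hA j (by omega)
      · intro j hj
        rw [pyGetD_pySetD_gt GB a j _ _ ha (by omega)]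
        exact hB j (by omega)

-- ===== VERDICT (by name: the statement is the Claim_ definition above) =====
theorem sort_row_spec : Claim_equal_sort_row := by
  intro n m G _ hpre
  unfold Spec_sort_row sort_row sort_row_alt
  by_cases hn : 0 < n
  · apply loop_eq m n G (hpre.1 hn) _ (n - 0).toNat 0 G G m (le_refl 0) rfl
      (fun _ _ => rfl) (fun _ _ => rfl)
    intro r hr
    exact hpre.2.2 r (by omega)
  · rw [PySem.List.pyRange_one_eq_nil (by omega)]
    rfl
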